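-- pv_equiv track=rewrite | github.com/pabloscrosati/PepAlign | _functions/iofuncs.py | gro_parse
-- ===== SOURCE A (Python) =====
-- def gro_parse(gro_file):
--     # Pull header and footer information
--     title, num_atoms, box_size = gro_file[0], gro_file[1], gro_file[-1]
--
--     resid, resname, atomname, atomnum, x_c, y_c, z_c, x_v, y_v, z_v = [], [], [], [], [], [], [], [], [], []
--
--     # Extract GRO file elements
--     for i in gro_file:
--         if i == title or i == num_atoms or i == box_size:
--             pass
--         else:
--             resid.append(i[0:5].strip())
--             resname.append(i[5:10].strip())
--             atomname.append(i[10:15].strip())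
--             atomnum.append(i[15:20].strip())
--             x_c.append(i[20:28].strip())
--             y_c.append(i[28:36].strip())
--             z_c.append(i[36:44].strip())
--             x_v.append(i[44:52].strip())
--             y_v.append(i[52:60].strip())
--             z_v.append(i[60:68].strip())
--     return title.strip(), num_atoms.strip(), box_size.strip(), resid, resname, atomname, atomnum, x_c, y_c, z_c, x_v, y_v, z_v
-- ===== SOURCE B (Python) =====
-- _FIELDS = ((0, 5), (5, 10), (10, 15), (15, 20), (20, 28),
--            (28, 36), (36, 44), (44, 52), (52, 60), (60, 68))
--
--
-- def gro_parse(gro_file):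
--     title, num_atoms, box_size = gro_file[0], gro_file[1], gro_file[-1]
--
--     # One row (10-tuple of stripped fixed-width fields) per atom line, then transpose.
--     rows = [tuple(line[a:b].strip() for a, b in _FIELDS)
--             for line in gro_file
--             if line != title and line != num_atoms and line != box_size]
--     cols = [list(c) for c in zip(*rows)] if rows else [[] for _ in _FIELDS]
--
--     return (title.strip(), num_atoms.strip(), box_size.strip(), *cols)
-- ===== Notes on version B (the rewrite author's own statement) =====
-- stated objective: alternative
-- what changed: Instead of A's ten parallel accumulator lists appended to inside the loop, B builds one list of 10-tuple rows by a filtered comprehension and transposes it once with zip(*rows) into the ten column lists.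
-- outside the precondition, e.g. on gro_parse(['only']): A raises IndexError, B raises IndexError
import Mathlib
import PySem

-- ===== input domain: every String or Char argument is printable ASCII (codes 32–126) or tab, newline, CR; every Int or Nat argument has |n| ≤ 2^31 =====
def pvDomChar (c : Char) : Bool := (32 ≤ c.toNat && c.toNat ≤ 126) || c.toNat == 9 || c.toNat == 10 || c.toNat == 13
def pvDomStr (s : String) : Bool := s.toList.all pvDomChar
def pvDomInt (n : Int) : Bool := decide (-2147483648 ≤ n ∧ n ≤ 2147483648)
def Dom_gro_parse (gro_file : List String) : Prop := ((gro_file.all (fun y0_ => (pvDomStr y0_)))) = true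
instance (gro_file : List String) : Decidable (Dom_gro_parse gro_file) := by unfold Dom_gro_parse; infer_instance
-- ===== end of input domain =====

-- B replaces A's ten in-loop accumulator lists by one filtered list of 10-tuple rows
-- transposed once into the ten columns (objective: alternative decomposition, same cost).

-- shared primitive: line[a:b].strip()
def pvField (s : String) (a b : Int) : String :=
  PySem.Str.strip (PySem.Str.slice s (some a) (some b))

-- ===== PORT A =====
-- A's loop state: ten parallel lists, appended to in place.
structure PvCols where
  c1 : List String
  c2 : List String
  c3 : List String
  c4 : List String
  c5 : List String
  c6 : List String
  c7 : List String
  c8 : List String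
  c9 : List String
  c10 : List String
deriving DecidableEq, Repr

def pvStepA (title num_atoms box_size : String) (acc : PvCols) (i : String) : PvCols :=
  if i == title || i == num_atoms || i == box_size then acc
  else ⟨acc.c1 ++ [pvField i 0 5], acc.c2 ++ [pvField i 5 10], acc.c3 ++ [pvField i 10 15],
        acc.c4 ++ [pvField i 15 20], acc.c5 ++ [pvField i 20 28], acc.c6 ++ [pvField i 28 36],
        acc.c7 ++ [pvField i 36 44], acc.c8 ++ [pvField i 44 52], acc.c9 ++ [pvField i 52 60],
        acc.c10 ++ [pvField i 60 68]⟩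

def gro_parse (gro_file : List String) : String × String × String × List String × List String × List String × List String × List String × List String × List String × List String × List String × List String :=
  let title := PySem.List.pyGetD gro_file 0 ""
  let num_atoms := PySem.List.pyGetD gro_file 1 ""
  let box_size := PySem.List.pyGetD gro_file (-1) ""
  let c := gro_file.foldl (pvStepA title num_atoms box_size) ⟨[], [], [], [], [], [], [], [], [], []⟩
  (PySem.Str.strip title, PySem.Str.strip num_atoms, PySem.Str.strip box_size,
   c.c1, c.c2, c.c3, c.c4, c.c5, c.c6, c.c7, c.c8, c.c9, c.c10)

-- ===== PORT B =====
-- one row = the 10-tuple of stripped fixed-width fields of a line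
structure PvRow where
  r1 : String
  r2 : String
  r3 : String
  r4 : String
  r5 : String
  r6 : String
  r7 : String
  r8 : String
  r9 : String
  r10 : String
deriving DecidableEq, Repr

def pvRowOf (line : String) : PvRow :=
  ⟨pvField line 0 5, pvField line 5 10, pvField line 10 15, pvField line 15 20,
   pvField line 20 28, pvField line 28 36, pvField line 36 44, pvField line 44 52,
   pvField line 52 60, pvField line 60 68⟩

-- zip(*rows) on fixed-arity 10-tuples (empty rows → ten empty lists)
def pvTranspose : List PvRow → PvCols
  | [] => ⟨[], [], [], [], [], [], [], [], [], []⟩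
  | r :: rs =>
    let t := pvTranspose rs
    ⟨r.r1 :: t.c1, r.r2 :: t.c2, r.r3 :: t.c3, r.r4 :: t.c4, r.r5 :: t.c5,
     r.r6 :: t.c6, r.r7 :: t.c7, r.r8 :: t.c8, r.r9 :: t.c9, r.r10 :: t.c10⟩

def gro_parse_alt (gro_file : List String) : String × String × String × List String × List String × List String × List String × List String × List String × List String × List String × List String × List String :=
  let title := PySem.List.pyGetD gro_file 0 ""
  let num_atoms := PySem.List.pyGetD gro_file 1 ""
  let box_size := PySem.List.pyGetD gro_file (-1) ""
  let rows := (gro_file.filter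
      (fun line => !(line == title) && !(line == num_atoms) && !(line == box_size))).map pvRowOf
  let c := pvTranspose rows
  (PySem.Str.strip title, PySem.Str.strip num_atoms, PySem.Str.strip box_size,
   c.c1, c.c2, c.c3, c.c4, c.c5, c.c6, c.c7, c.c8, c.c9, c.c10)

-- ===== PRECONDITION & SPEC =====
-- A raises IndexError on gro_file[1] (and gro_file[0]/[-1]) when the list has fewer than two lines.
def Pre_gro_parse (gro_file : List String) : Prop := 2 ≤ gro_file.length
instance (gro_file : List String) : Decidable (Pre_gro_parse gro_file) := by unfold Pre_gro_parse; infer_instance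

def pvWitness_gro_parse : List String := ["title", "1", "    1RES   OW    1   1.000   2.000   3.000", " 10.0 10.0 10.0"]

def Spec_gro_parse (gro_file : List String) (out : String × String × String × List String × List String × List String × List String × List String × List String × List String × List String × List String × List String) : Prop := out = gro_parse_alt gro_file
instance (gro_file : List String) (out : String × String × String × List String × List String × List String × List String × List String × List String × List String × List String × List String × List String) : Decidable (Spec_gro_parse gro_file out) := by
  unfold Spec_gro_parse
  letI d1 : DecidableEq (List String × List String × List String × List String) := inferInstance
  letI d2 : DecidableEq (List String × List String × List String × List String × List String × List String × List String × List String) := inferInstance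
  letI d3 : DecidableEq (List String × List String × List String × List String × List String × List String × List String × List String × List String × List String) := inferInstance
  infer_instance

-- ===== CLAIM (what is proved, stated in full; the proofs are below) =====
def Claim_equal_gro_parse : Prop := ∀ (gro_file : List String), Dom_gro_parse gro_file → Pre_gro_parse gro_file → Spec_gro_parse gro_file (gro_parse gro_file)

-- ===== LEMMAS AND PROOFS =====

/-- fieldwise append of a column block onto an accumulator. -/
def pvAppendCols (a b : PvCols) : PvCols :=
  ⟨a.c1 ++ b.c1, a.c2 ++ b.c2, a.c3 ++ b.c3, a.c4 ++ b.c4, a.c5 ++ b.c5,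
   a.c6 ++ b.c6, a.c7 ++ b.c7, a.c8 ++ b.c8, a.c9 ++ b.c9, a.c10 ++ b.c10⟩

lemma pvFoldA_eq (t n b : String) (l : List String) (acc : PvCols) :
    l.foldl (pvStepA t n b) acc =
      pvAppendCols acc
        (pvTranspose ((l.filter
          (fun line => !(line == t) && !(line == n) && !(line == b))).map pvRowOf)) := by
  induction l generalizing acc with
  | nil => cases acc; simp [pvAppendCols, pvTranspose]
  | cons x xs ih =>
    by_cases hx : (x == t || x == n || x == b) = true
    · have hf : (!(x == t) && !(x == n) && !(x == b)) = false := by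
        simp only [Bool.or_eq_true] at hx
        rcases hx with (h | h) | h <;> simp [h]
      simp [pvStepA, hx, hf, ih]
    · have hf : (!(x == t) && !(x == n) && !(x == b)) = true := by
        simp only [Bool.or_eq_true] at hx
        push Not at hx
        simp [hx.1.1, hx.1.2, hx.2]
      simp only [List.foldl_cons, pvStepA, hx, List.filter_cons, hf, if_true,
        List.map_cons, ih]
      cases acc
      simp [pvAppendCols, pvTranspose, pvRowOf]

-- ===== VERDICT (by name: the statement is the Claim_ definition above) =====
theorem gro_parse_spec : Claim_equal_gro_parse := by
  intro gro_file _ _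
  show gro_parse gro_file = gro_parse_alt gro_file
  unfold gro_parse gro_parse_alt
  simp only [pvFoldA_eq]
  cases h : pvTranspose _
  simp [pvAppendCols]
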